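-- pv_equiv track=rewrite | github.com/Vladislav0504/Python-mini-programs | fibonacci_numbers_mod.py | fib_digit
-- ===== SOURCE A (Python) =====
-- def fib_digit(n):
--     if n <= 1:
--         return n
--     m = 10
--     res1, res2 = 0, 1
--     p = 0
--     for i in range(n - 1):
--         res1, res2 = res2, (res2 + res1) % m
--         if res1 == 0 and res2 == 1:
--             p = i + 1
--             break
--     if p == 0:
--         return res2
--     w = n % p
--     if w <= 1:
--         return w
--     for i in range(w - 1):
--         res1, res2 = res2, (res2 + res1) % m
--     return res2
-- ===== SOURCE B (Python) =====
-- # Pisano period of 10 is 60: precompute the 60 last digits once, then answer by lookup.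
-- _TABLE = []
-- _a, _b = 0, 1
-- for _ in range(60):
--     _TABLE.append(_a)
--     _a, _b = _b, (_a + _b) % 10
--
--
-- def fib_digit(n):
--     if n <= 1:
--         return n
--     return _TABLE[n % 60]
-- ===== Notes on version B (the rewrite author's own statement) =====
-- stated objective: simpler
-- what changed: Replaces A's runtime Pisano-period discovery loop plus a second Fibonacci loop with a 60-entry table of Fibonacci last digits precomputed once, indexed by n % 60.
import Mathlib
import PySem

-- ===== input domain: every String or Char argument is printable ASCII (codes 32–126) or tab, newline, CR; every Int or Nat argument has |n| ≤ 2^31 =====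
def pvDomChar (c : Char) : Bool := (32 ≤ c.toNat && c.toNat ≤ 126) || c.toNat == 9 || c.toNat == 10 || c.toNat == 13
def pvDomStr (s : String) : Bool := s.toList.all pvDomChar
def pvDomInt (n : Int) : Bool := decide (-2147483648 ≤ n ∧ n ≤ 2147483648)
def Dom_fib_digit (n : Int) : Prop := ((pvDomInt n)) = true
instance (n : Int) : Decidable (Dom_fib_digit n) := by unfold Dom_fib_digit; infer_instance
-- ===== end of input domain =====

-- B precomputes the 60-entry Pisano table once and answers by lookup; A discovers the period at runtime.

-- ===== PORT A =====
-- one step of 'res1, res2 = res2, (res2 + res1) % m' with m = 10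
def fdStep (s : Int × Int) : Int × Int := (s.2, PySem.Int.mod (s.2 + s.1) 10)

-- 'for i in range(n-1): step; if res1 == 0 and res2 == 1: p = i + 1; break' — returns (state, p)
def fdLoop1 : Nat → (Int × Int) → Nat → ((Int × Int) × Nat)
  | 0, s, _ => (s, 0)
  | fuel + 1, s, i =>
    let s' := fdStep s
    if s'.1 = 0 ∧ s'.2 = 1 then (s', i + 1)
    else fdLoop1 fuel s' (i + 1)

-- 'for i in range(w-1): step'
def fdLoop2 : Nat → (Int × Int) → (Int × Int)
  | 0, s => s
  | k + 1, s => fdLoop2 k (fdStep s)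

def fib_digit (n : Int) : Int :=
  if n ≤ 1 then n
  else
    let r := fdLoop1 (n - 1).toNat (0, 1) 0
    if r.2 = 0 then r.1.2
    else
      let w := PySem.Int.mod n (r.2 : Int)
      if w ≤ 1 then w
      else (fdLoop2 (w - 1).toNat r.1).2

-- ===== PORT B =====
-- module-level table build: 'for _ in range(60): TABLE.append(a); a, b = b, (a+b) % 10'
def fdBuild : Nat → Int → Int → List Int
  | 0, _, _ => []
  | k + 1, a, b => a :: fdBuild k b (PySem.Int.mod (a + b) 10)

def fdTable : List Int := fdBuild 60 0 1

def fib_digit_alt (n : Int) : Int :=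
  if n ≤ 1 then n
  -- TABLE[n % 60]: the index is provably in [0, 60), so the default is never used
  else (PySem.List.pyGet? fdTable (PySem.Int.mod n 60)).getD 0

-- ===== PRECONDITION & SPEC =====
def Spec_fib_digit (n : Int) (out : Int) : Prop := out = fib_digit_alt n
instance (n : Int) (out : Int) : Decidable (Spec_fib_digit n out) := by unfold Spec_fib_digit; infer_instance

-- ===== CLAIM (what is proved, stated in full; the proofs are below) =====
def Claim_equal_fib_digit : Prop := ∀ (n : Int), Dom_fib_digit n → Spec_fib_digit n (fib_digit n)

-- ===== LEMMAS AND PROOFS =====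

-- loop2 commutes with a leading step
theorem fdLoop2_step (k : Nat) (s : Int × Int) :
    fdLoop2 (k + 1) s = fdLoop2 k (fdStep s) := rfl

-- no-break run: if the break condition never fires within fuel steps, fdLoop1 just iterates and p = 0
theorem fdLoop1_noBreak : ∀ (fuel : Nat) (s : Int × Int) (i : Nat),
    (∀ j, 1 ≤ j → j ≤ fuel → ¬ ((fdLoop2 j s).1 = 0 ∧ (fdLoop2 j s).2 = 1)) →
    fdLoop1 fuel s i = (fdLoop2 fuel s, 0) := by
  intro fuel
  induction fuel with
  | zero => intro s i _; rfl
  | succ f ih =>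
    intro s i h
    have h1 : ¬ ((fdStep s).1 = 0 ∧ (fdStep s).2 = 1) := by
      have := h 1 (by omega) (by omega)
      simpa [fdLoop2] using this
    simp only [fdLoop1, h1, if_false]
    have := ih (fdStep s) (i + 1) (by
      intro j hj1 hj2
      have := h (j + 1) (by omega) (by omega)
      simpa [fdLoop2_step] using this)
    simp [this, fdLoop2_step]

-- break run: if the condition first fires at step t ≤ fuel, fdLoop1 stops there with p = i + t
theorem fdLoop1_break : ∀ (t fuel : Nat) (s : Int × Int) (i : Nat),
    1 ≤ t → t ≤ fuel →
    (∀ j, 1 ≤ j → j < t → ¬ ((fdLoop2 j s).1 = 0 ∧ (fdLoop2 j s).2 = 1)) →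
    ((fdLoop2 t s).1 = 0 ∧ (fdLoop2 t s).2 = 1) →
    fdLoop1 fuel s i = (fdLoop2 t s, i + t) := by
  intro t
  induction t with
  | zero => intro fuel s i h1; omega
  | succ t ih =>
    intro fuel s i _ hle hpre hbrk
    obtain ⟨f, rfl⟩ : ∃ f, fuel = f + 1 := ⟨fuel - 1, by omega⟩
    by_cases ht : t = 0
    · subst ht
      have : (fdStep s).1 = 0 ∧ (fdStep s).2 = 1 := by simpa [fdLoop2] using hbrk
      simp [fdLoop1, this, fdLoop2]
    · have h1 : ¬ ((fdStep s).1 = 0 ∧ (fdStep s).2 = 1) := by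
        have := hpre 1 (by omega) (by omega)
        simpa [fdLoop2] using this
      simp only [fdLoop1, h1, if_false]
      have := ih f (fdStep s) (i + 1) (by omega) (by omega)
        (by intro j hj1 hj2
            have := hpre (j + 1) (by omega) (by omega)
            simpa [fdLoop2_step] using this)
        (by simpa [fdLoop2_step] using hbrk)
      rw [this, ← fdLoop2_step]
      congr 1
      omega

-- finite facts about the first 60 states (kernel computation)
set_option maxRecDepth 10000 in
theorem fd_no_early_period : ∀ j : Fin 60, 1 ≤ j.val →
    ¬ ((fdLoop2 j.val (0, 1)).1 = 0 ∧ (fdLoop2 j.val (0, 1)).2 = 1) := by decide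

set_option maxRecDepth 10000 in
theorem fd_period_60 : (fdLoop2 60 (0, 1)).1 = 0 ∧ (fdLoop2 60 (0, 1)).2 = 1 := by decide

-- small-n bridge: for 2 ≤ m ≤ 60, the (m-1)-step iterate's second component is the table entry at m % 60
set_option maxRecDepth 10000 in
theorem fd_small : ∀ m : Fin 61, 2 ≤ m.val →
    (fdLoop2 (m.val - 1) (0, 1)).2
      = (PySem.List.pyGet? fdTable (PySem.Int.mod (m.val : Int) 60)).getD 0 := by decide

-- residue bridge: for w < 60, A's second-phase answer from state (0,1) equals the table entry at w
set_option maxRecDepth 10000 in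
theorem fd_res : ∀ w : Fin 60,
    (if (w.val : Int) ≤ 1 then (w.val : Int) else (fdLoop2 ((w.val : Int) - 1).toNat (0, 1)).2)
      = (PySem.List.pyGet? fdTable ((w.val : Int))).getD 0 := by decide

-- ===== VERDICT (by name: the statement is the Claim_ definition above) =====
theorem fib_digit_spec : Claim_equal_fib_digit := by
  intro n _
  unfold Spec_fib_digit fib_digit fib_digit_alt
  by_cases hn1 : n ≤ 1
  · simp [hn1]
  · simp only [hn1, if_false]
    replace hn1 : 1 < n := by omega
    by_cases hle : n ≤ 60
    · -- no break: fuel = (n-1).toNat ≤ 59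
      rw [fdLoop1_noBreak _ _ _ (by
        intro j hj1 hj2
        have hj : j < 60 := by omega
        exact fd_no_early_period ⟨j, hj⟩ hj1)]
      simp only
      rw [if_pos trivial]
      rw [show (n - 1).toNat = n.toNat - 1 by omega,
          show n = ((n.toNat : Int)) by omega]
      exact fd_small ⟨n.toNat, by omega⟩ (show 2 ≤ n.toNat by omega)
    · -- break at t = 60
      replace hle : 60 < n := by omega
      rw [fdLoop1_break 60 _ _ _ (by omega) (by omega)
        (by intro j hj1 hj2; exact fd_no_early_period ⟨j, by omega⟩ hj1)
        fd_period_60]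
      have hst : fdLoop2 60 ((0 : Int), (1 : Int)) = (0, 1) := by
        obtain ⟨h1, h2⟩ := fd_period_60
        exact Prod.ext h1 h2
      rw [hst]
      simp only [Nat.zero_add]
      rw [if_neg (by decide)]
      rw [show (((60 : Nat) : Int)) = (60 : Int) by norm_num]
      have hwlt : PySem.Int.mod n 60 < 60 := PySem.Int.mod_lt n (by norm_num)
      have hwge : 0 ≤ PySem.Int.mod n 60 := PySem.Int.mod_nonneg n (by norm_num)
      rw [show PySem.Int.mod n 60 = (((PySem.Int.mod n 60).toNat : Int)) by omega]
      exact fd_res ⟨(PySem.Int.mod n 60).toNat, by omega⟩
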